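-- pv_equiv track=rewrite | github.com/Optifye/autoresearch | src/autoresearch_vjepa/label_conversion.py | _clip_spans_to_interval
-- ===== SOURCE A (Python) =====
-- from typing import Any, Dict, Iterable, List, Optional, Sequence, Tuple
--
-- def _merge_spans(spans: Iterable[Tuple[int, int, int]]) -> List[Tuple[int, int, int]]:
--     ordered = sorted((int(lbl), int(s), int(e)) for lbl, s, e in spans if int(e) >= int(s))
--     if not ordered:
--         return []
--     out: List[Tuple[int, int, int]] = []
--     cur_lbl, cur_s, cur_e = ordered[0]
--     for lbl, s, e in ordered[1:]:
--         if lbl == cur_lbl and s <= (cur_e + 1):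
--             cur_e = max(cur_e, e)
--             continue
--         out.append((cur_lbl, cur_s, cur_e))
--         cur_lbl, cur_s, cur_e = lbl, s, e
--     out.append((cur_lbl, cur_s, cur_e))
--     return out
--
-- def _clip_spans_to_interval(
--     spans: Sequence[Tuple[int, int, int]],
--     interval: Tuple[int, int],
-- ) -> List[Tuple[int, int, int]]:
--     lo = int(interval[0])
--     hi = int(interval[1])
--     out: List[Tuple[int, int, int]] = []
--     for label_id, start, end in spans:
--         if int(end) < lo or int(start) > hi:
--             continue
--         clipped_start = max(lo, int(start))
--         clipped_end = min(hi, int(end))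
--         if clipped_end < clipped_start:
--             continue
--         out.append((int(label_id), int(clipped_start), int(clipped_end)))
--     return _merge_spans(out)
-- ===== SOURCE B (Python) =====
-- def _clip_spans_to_interval(spans, interval):
--     lo = int(interval[0])
--     hi = int(interval[1])
--     clipped = []
--     for label_id, start, end in spans:
--         s = max(lo, int(start))
--         e = min(hi, int(end))
--         if s <= e:
--             clipped.append((int(label_id), s, e))
--     result = []
--     for lbl in sorted({l for l, _, _ in clipped}):
--         pairs = sorted((s, e) for l, s, e in clipped if l == lbl)
--         cs, ce = pairs[0]
--         for s, e in pairs[1:]: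
--             if s <= ce + 1:
--                 if e > ce:
--                     ce = e
--             else:
--                 result.append((lbl, cs, ce))
--                 cs, ce = s, e
--         result.append((lbl, cs, ce))
--     return result
-- ===== Notes on version B (the rewrite author's own statement) =====
-- stated objective: alternative
-- what changed: B replaces A's single global lexicographic sort of all clipped triples followed by one scan with a label-change branch by a group-by-label decomposition: it clips in one pass, then iterates over the sorted distinct labels and runs an independent sort-and-linear-merge per label group.
import Mathlib
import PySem

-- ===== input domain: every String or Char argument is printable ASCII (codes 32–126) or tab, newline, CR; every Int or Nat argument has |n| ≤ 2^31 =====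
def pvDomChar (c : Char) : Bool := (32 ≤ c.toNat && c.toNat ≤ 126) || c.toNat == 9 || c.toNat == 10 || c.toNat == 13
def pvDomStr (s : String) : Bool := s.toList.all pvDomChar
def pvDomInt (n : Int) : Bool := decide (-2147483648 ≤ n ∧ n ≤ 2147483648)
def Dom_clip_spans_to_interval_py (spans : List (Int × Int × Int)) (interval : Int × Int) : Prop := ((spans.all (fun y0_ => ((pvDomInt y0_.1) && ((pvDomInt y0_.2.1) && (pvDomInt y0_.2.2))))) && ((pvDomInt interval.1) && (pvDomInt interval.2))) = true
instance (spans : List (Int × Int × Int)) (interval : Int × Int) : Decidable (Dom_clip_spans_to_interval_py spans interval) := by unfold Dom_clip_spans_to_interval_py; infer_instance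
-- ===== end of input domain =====

-- B regroups the clipped spans by label (sorted distinct labels, then an independent
-- linear merge per label) instead of A's single global tuple-sort with a label-change
-- branch in one scan; objective: alternative decomposition, same exact output.

-- ===== PORT A =====
-- Python's 3-tuple comparison is lexicographic: encode it as a sort key into the Lex order.
def pvKey3 (t : Int × Int × Int) : Lex (Int × Lex (Int × Int)) := toLex (t.1, toLex (t.2.1, t.2.2))

-- loop body of _merge_spans' scan (state = (out, (cur_lbl, cur_s, cur_e)))
def pvMergeStepA (st : List (Int × Int × Int) × Int × Int × Int) (t : Int × Int × Int) :
    List (Int × Int × Int) × Int × Int × Int :=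
  if t.1 == st.2.1 && decide (t.2.1 ≤ st.2.2.2 + 1) then
    (st.1, st.2.1, st.2.2.1, max st.2.2.2 t.2.2)
  else
    (st.1 ++ [st.2], t)

-- _merge_spans
def pvMergeSpans (spans : List (Int × Int × Int)) : List (Int × Int × Int) :=
  let ordered := PySem.List.sorted (spans.filter (fun t => decide (t.2.1 ≤ t.2.2))) pvKey3
  match ordered with
  | [] => []
  | c :: rest =>
      let fin := rest.foldl pvMergeStepA ([], c)
      fin.1 ++ [fin.2]

-- _clip_spans_to_interval
def clip_spans_to_interval_py (spans : List (Int × Int × Int)) (interval : Int × Int) : List (Int × Int × Int) :=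
  let lo := interval.1
  let hi := interval.2
  let out := spans.foldl (fun out t =>
    if decide (t.2.2 < lo) || decide (t.2.1 > hi) then out
    else
      let clipped_start := max lo t.2.1
      let clipped_end := min hi t.2.2
      if decide (clipped_end < clipped_start) then out
      else out ++ [(t.1, clipped_start, clipped_end)]) []
  pvMergeSpans out

-- ===== PORT B =====
-- loop body of B's per-label merge (state = (result, (cs, ce)))
def pvBStep (lbl : Int) (st : List (Int × Int × Int) × Int × Int) (q : Int × Int) :
    List (Int × Int × Int) × Int × Int :=
  if decide (q.1 ≤ st.2.2 + 1) then
    (st.1, st.2.1, if decide (st.2.2 < q.2) then q.2 else st.2.2)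
  else
    (st.1 ++ [(lbl, st.2.1, st.2.2)], q.1, q.2)

-- body of B's 'for lbl in sorted({...})' loop
def pvBGroup (clipped : List (Int × Int × Int)) (result : List (Int × Int × Int)) (lbl : Int) :
    List (Int × Int × Int) :=
  let pairs := PySem.List.sorted ((clipped.filter (fun t => t.1 == lbl)).map (fun t => (t.2.1, t.2.2)))
      (fun p => (toLex p : Lex (Int × Int)))
  match pairs with
  | [] => result   -- unreachable: every label of the loop occurs in clipped (Python would raise on pairs[0])
  | p :: rest =>
      let fin := rest.foldl (pvBStep lbl) (result, p)
      fin.1 ++ [(lbl, fin.2.1, fin.2.2)]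

def clip_spans_to_interval_py_alt (spans : List (Int × Int × Int)) (interval : Int × Int) : List (Int × Int × Int) :=
  let lo := interval.1
  let hi := interval.2
  let clipped := spans.foldl (fun acc t =>
      let s := max lo t.2.1
      let e := min hi t.2.2
      if decide (s ≤ e) then acc ++ [(t.1, s, e)] else acc) []
  let labels := PySem.List.sorted (PySem.Set.ofList (clipped.map (·.1))) (fun x => x)
  labels.foldl (pvBGroup clipped) []

-- ===== PRECONDITION & SPEC =====
def Spec_clip_spans_to_interval_py (spans : List (Int × Int × Int)) (interval : Int × Int) (out : List (Int × Int × Int)) : Prop := out = clip_spans_to_interval_py_alt spans interval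
instance (spans : List (Int × Int × Int)) (interval : Int × Int) (out : List (Int × Int × Int)) : Decidable (Spec_clip_spans_to_interval_py spans interval out) := by unfold Spec_clip_spans_to_interval_py; infer_instance

-- ===== CLAIM (what is proved, stated in full; the proofs are below) =====
def Claim_equal_clip_spans_to_interval_py : Prop := ∀ (spans : List (Int × Int × Int)) (interval : Int × Int), Dom_clip_spans_to_interval_py spans interval → Spec_clip_spans_to_interval_py spans interval (clip_spans_to_interval_py spans interval)

-- ===== LEMMAS AND PROOFS =====

-- the clipped spans, as an element-wise flatMap
def pvClip (lo hi : Int) (t : Int × Int × Int) : List (Int × Int × Int) :=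
  if decide (max lo t.2.1 ≤ min hi t.2.2) then [(t.1, max lo t.2.1, min hi t.2.2)] else []

-- B's sorted pair list for one label
def pvPairs (c : List (Int × Int × Int)) (l : Int) : List (Int × Int) :=
  PySem.List.sorted ((c.filter (fun t => t.1 == l)).map (fun t => (t.2.1, t.2.2)))
    (fun p => (toLex p : Lex (Int × Int)))

def pvTri (l : Int) (p : Int × Int) : Int × Int × Int := (l, p.1, p.2)

-- B's group body on an explicit pair list
def pvRunG (lbl : Int) (result : List (Int × Int × Int)) (pairs : List (Int × Int)) : List (Int × Int × Int) :=
  match pairs with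
  | [] => result
  | p :: rest =>
      let fin := rest.foldl (pvBStep lbl) (result, p)
      fin.1 ++ [(lbl, fin.2.1, fin.2.2)]

lemma pvBGroup_eq (c : List (Int × Int × Int)) (r : List (Int × Int × Int)) (l : Int) :
    pvBGroup c r l = pvRunG l r (pvPairs c l) := rfl

lemma clipA_eq (spans : List (Int × Int × Int)) (lo hi : Int) :
    spans.foldl (fun out t =>
      if decide (t.2.2 < lo) || decide (t.2.1 > hi) then out
      else
        let clipped_start := max lo t.2.1
        let clipped_end := min hi t.2.2
        if decide (clipped_end < clipped_start) then out
        else out ++ [(t.1, clipped_start, clipped_end)]) [] = spans.flatMap (pvClip lo hi) := by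
  refine Eq.trans (PySem.List.foldl_congr_mem' spans _ (fun out t => out ++ pvClip lo hi t) [] ?_)
    (PySem.List.foldl_append_eq_flatMap _ _ _)
  intro t _ out
  rcases t with ⟨a, s, e⟩
  simp only [pvClip, decide_eq_true_eq, Bool.or_eq_true]
  split_ifs <;> simp_all <;> omega

lemma clipB_eq (spans : List (Int × Int × Int)) (lo hi : Int) :
    spans.foldl (fun acc t =>
      let s := max lo t.2.1
      let e := min hi t.2.2
      if decide (s ≤ e) then acc ++ [(t.1, s, e)] else acc) [] = spans.flatMap (pvClip lo hi) := by
  refine Eq.trans (PySem.List.foldl_congr_mem' spans _ (fun acc t => acc ++ pvClip lo hi t) [] ?_)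
    (PySem.List.foldl_append_eq_flatMap _ _ _)
  intro t _ acc
  simp only [pvClip, decide_eq_true_eq]
  split_ifs <;> simp

lemma pvClip_le {lo hi : Int} {t u : Int × Int × Int} (h : u ∈ pvClip lo hi t) : u.2.1 ≤ u.2.2 := by
  unfold pvClip at h
  split at h <;> simp_all

-- within one label group A's scan is B's scan
lemma inGroup (l : Int) (ps : List (Int × Int)) :
    ∀ (out : List (Int × Int × Int)) (s e : Int),
      (ps.map (pvTri l)).foldl pvMergeStepA (out, (l, s, e)) =
        (let st := ps.foldl (pvBStep l) (out, (s, e)); (st.1, (l, st.2.1, st.2.2))) := by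
  induction ps with
  | nil => intro out s e; rfl
  | cons p ps ih =>
      intro out s e
      simp only [List.map_cons, List.foldl_cons, pvMergeStepA, pvBStep, pvTri]
      simp only [beq_self_eq_true, Bool.true_and]
      by_cases h : p.1 ≤ e + 1
      · simp only [h, decide_true, if_true]
        have hm : max e p.2 = if decide (e < p.2) = true then p.2 else e := by
          by_cases h2 : e < p.2
          · rw [if_pos (by simpa using h2), max_eq_right h2.le]
          · rw [if_neg (by simpa using h2), max_eq_left (not_lt.mp h2)]
        rw [hm]; exact ih out s _
      · simp only [h, decide_false, Bool.false_eq_true, if_false]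
        exact ih _ _ _

-- A's scan over label-grouped blocks with strictly increasing labels = B's per-group folds
lemma scan_groups (P : Int → List (Int × Int)) (gs : List Int) :
    ∀ (out : List (Int × Int × Int)) (l s e : Int) (ps : List (Int × Int)),
      (∀ g ∈ gs, l < g) → gs.Pairwise (· < ·) → (∀ g ∈ gs, P g ≠ []) →
      (let fin := (ps.map (pvTri l) ++ gs.flatMap (fun g => (P g).map (pvTri g))).foldl pvMergeStepA (out, (l, s, e));
        fin.1 ++ [fin.2]) =
      gs.foldl (fun res g => pvRunG g res (P g)) (pvRunG l out ((s, e) :: ps)) := by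
  induction gs with
  | nil =>
      intro out l s e ps _ _ _
      simp only [List.flatMap_nil, List.append_nil, List.foldl_nil]
      rw [inGroup]
      rfl
  | cons lg gs ih =>
      intro out l s e ps hl hp hne
      cases hq : P lg with
      | nil => exact absurd hq (hne lg (by simp))
      | cons q qs =>
          have hlg : l < lg := hl lg (by simp)
          have hsplit : ps.map (pvTri l) ++ (lg :: gs).flatMap (fun g => (P g).map (pvTri g)) =
              ps.map (pvTri l) ++ (pvTri lg q :: (qs.map (pvTri lg) ++ gs.flatMap (fun g => (P g).map (pvTri g)))) := by
            simp [hq]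
          rw [hsplit, List.foldl_append, inGroup, List.foldl_cons]
          show (let st := ps.foldl (pvBStep l) (out, (s, e));
            ((qs.map (pvTri lg) ++ gs.flatMap (fun g => (P g).map (pvTri g))).foldl pvMergeStepA
              (pvMergeStepA (st.1, (l, st.2.1, st.2.2)) (pvTri lg q))).1 ++ [_]) = _
          have hbe : ((pvTri lg q).1 == l) = false := by
            simp [pvTri]; omega
          simp only [pvMergeStepA, hbe, Bool.false_and, Bool.false_eq_true, if_false]
          rw [List.foldl_cons, hq]
          exact ih (pvRunG l out ((s, e) :: ps)) lg q.1 q.2 qs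
            (fun g hg => (List.pairwise_cons.mp hp).1 g hg)
            (List.pairwise_cons.mp hp).2
            (fun g hg => hne g (List.mem_cons_of_mem _ hg))

lemma flatMap_filter_perm (ls : List Int) :
    ∀ (c : List (Int × Int × Int)), ls.Nodup → (∀ t ∈ c, t.1 ∈ ls) →
      (ls.flatMap (fun l => c.filter (fun t => t.1 == l))).Perm c := by
  induction ls with
  | nil =>
      intro c _ hcov
      cases c with
      | nil => simp
      | cons t c => exact absurd (hcov t (by simp)) (by simp)
  | cons l ls ih =>
      intro c hnd hcov
      simp only [List.flatMap_cons]
      have hcongr : ∀ l' ∈ ls, (c.filter (fun t => t.1 == l')) =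
          ((c.filter (fun t => !(t.1 == l))).filter (fun t => t.1 == l')) := by
        intro l' hl'
        have hne : l' ≠ l := by rintro rfl; exact (List.nodup_cons.mp hnd).1 hl'
        rw [List.filter_filter]
        apply List.filter_congr
        intro t _
        by_cases h : t.1 = l' <;> simp [h, hne]
      have hperm2 : (ls.flatMap (fun l' => c.filter (fun t => t.1 == l'))).Perm
          (c.filter (fun t => !(t.1 == l))) := by
        refine (List.Perm.flatMap_left ls (fun a ha => by rw [hcongr a ha])).trans ?_
        refine ih _ (List.nodup_cons.mp hnd).2 ?_
        intro t ht
        have h1 := hcov t (List.mem_of_mem_filter ht)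
        have h2 : ¬ (t.1 == l) = true := by
          have := List.of_mem_filter ht
          simpa using this
        simp only [List.mem_cons] at h1
        rcases h1 with h1 | h1
        · exact absurd (by simp [h1]) h2
        · exact h1
      exact ((List.Perm.append_left _ hperm2).trans (List.filter_append_perm _ c))

-- the globally sorted clipped list is the concatenation of per-label sorted blocks
lemma sorted_decomp (c : List (Int × Int × Int)) :
    PySem.List.sorted c pvKey3 =
      (PySem.List.sorted (PySem.Set.ofList (c.map (·.1))) (fun x => x)).flatMap
        (fun l => (pvPairs c l).map (pvTri l)) := by
  have hinj : Function.Injective pvKey3 := by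
    intro a b h
    have h1 := congrArg ofLex h
    simp only [pvKey3, ofLex_toLex, Prod.mk.injEq] at h1
    obtain ⟨h2, h3⟩ := h1
    have h4 := congrArg ofLex h3
    simp only [ofLex_toLex, Prod.mk.injEq] at h4
    exact Prod.ext h2 (Prod.ext h4.1 h4.2)
  have hlabels := PySem.List.sorted_ofList_pairwise_lt (c.map (·.1))
  -- per-label block is a permutation of the corresponding filter
  have hblock : ∀ l, ((pvPairs c l).map (pvTri l)).Perm (c.filter (fun t => t.1 == l)) := by
    intro l
    have h1 : (pvPairs c l).Perm ((c.filter (fun t => t.1 == l)).map (fun t => (t.2.1, t.2.2))) :=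
      PySem.List.sorted_perm _ _ _
    have h2 := h1.map (pvTri l)
    rw [List.map_map] at h2
    have h3 : (c.filter (fun t => t.1 == l)).map (pvTri l ∘ fun t => (t.2.1, t.2.2)) =
        c.filter (fun t => t.1 == l) := by
      have hid : ∀ t ∈ c.filter (fun t => t.1 == l), (pvTri l ∘ fun t => (t.2.1, t.2.2)) t = id t := by
        intro t ht
        have ht1 : t.1 = l := by simpa using (List.of_mem_filter ht)
        simp [pvTri, Function.comp, ← ht1]
      rw [List.map_congr_left hid, List.map_id]
    rw [h3] at h2
    exact h2
  have hnd : (PySem.List.sorted (PySem.Set.ofList (c.map (fun x => x.1))) (fun x => x)).Nodup :=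
    (PySem.List.sorted_perm _ _ _).nodup_iff.mpr (PySem.Set.nodup_ofList _)
  have hcov : ∀ t ∈ c, t.1 ∈ PySem.List.sorted (PySem.Set.ofList (c.map (fun x => x.1))) (fun x => x) := by
    intro t ht
    rw [PySem.List.mem_sorted, PySem.Set.mem_ofList]
    exact List.mem_map_of_mem ht
  apply PySem.List.eq_of_perm_of_pairwise_le_of_injective pvKey3 hinj
  · -- permutation
    exact (PySem.List.sorted_perm _ _ _).trans
      (((flatMap_filter_perm (PySem.List.sorted (PySem.Set.ofList (c.map (fun x => x.1))) (fun x => x)) c hnd hcov).symm).trans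
        (List.Perm.flatMap_left _ (fun a _ => (hblock a).symm)))
  · exact PySem.List.sorted_pairwise _ _
  · rw [List.pairwise_flatMap]
    constructor
    · intro l _
      refine List.Pairwise.map (pvTri l) ?_ (PySem.List.sorted_pairwise _ _)
      intro p q hpq
      simp only [pvKey3, pvTri]
      rw [Prod.Lex.le_iff]
      right
      exact ⟨rfl, hpq⟩
    · refine hlabels.imp ?_
      intro a b hab x hx y hy
      obtain ⟨p, _, rfl⟩ := List.mem_map.mp hx
      obtain ⟨q, _, rfl⟩ := List.mem_map.mp hy
      simp only [pvKey3, pvTri]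
      rw [Prod.Lex.le_iff]
      left
      exact hab

-- pvPairs is nonempty on every label of the clipped list
lemma pvPairs_ne {c : List (Int × Int × Int)} {l : Int}
    (h : l ∈ PySem.List.sorted (PySem.Set.ofList (c.map (·.1))) (fun x => x)) :
    pvPairs c l ≠ [] := by
  rw [PySem.List.mem_sorted, PySem.Set.mem_ofList, List.mem_map] at h
  obtain ⟨t, ht, hl⟩ := h
  intro hnil
  rw [pvPairs, PySem.List.sorted_eq_nil_iff, List.map_eq_nil_iff, List.filter_eq_nil_iff] at hnil
  exact hnil t ht (by simp [hl])


-- ===== VERDICT (by name: the statement is the Claim_ definition above) =====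
theorem clip_spans_to_interval_py_spec : Claim_equal_clip_spans_to_interval_py := by
  intro spans interval _
  unfold Spec_clip_spans_to_interval_py
  unfold clip_spans_to_interval_py clip_spans_to_interval_py_alt
  dsimp only
  rw [clipA_eq spans interval.1 interval.2, clipB_eq spans interval.1 interval.2]
  unfold pvMergeSpans
  have hfil : (spans.flatMap (pvClip interval.1 interval.2)).filter (fun t => decide (t.2.1 ≤ t.2.2)) =
      spans.flatMap (pvClip interval.1 interval.2) := by
    apply List.filter_eq_self.mpr
    intro t ht
    obtain ⟨x, _, hx⟩ := List.mem_flatMap.mp ht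
    exact decide_eq_true (pvClip_le hx)
  rw [hfil, sorted_decomp]
  have hfold : ∀ (ls : List Int) (init : List (Int × Int × Int)),
      ls.foldl (fun res g => pvRunG g res (pvPairs (spans.flatMap (pvClip interval.1 interval.2)) g)) init =
      ls.foldl (pvBGroup (spans.flatMap (pvClip interval.1 interval.2))) init := by
    intro ls init
    apply PySem.List.foldl_congr_mem'
    intro l _ acc
    exact (pvBGroup_eq _ _ _).symm
  cases hlab : PySem.List.sorted (PySem.Set.ofList ((spans.flatMap (pvClip interval.1 interval.2)).map (fun x => x.1))) (fun x => x) with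
  | nil => simp
  | cons l0 ls =>
      have hmem : ∀ l ∈ l0 :: ls, pvPairs (spans.flatMap (pvClip interval.1 interval.2)) l ≠ [] := by
        intro l hlmem
        exact pvPairs_ne (by rw [hlab]; exact hlmem)
      have hpw : (l0 :: ls).Pairwise (· < ·) := by
        rw [← hlab]; exact PySem.List.sorted_ofList_pairwise_lt _
      cases h0 : pvPairs (spans.flatMap (pvClip interval.1 interval.2)) l0 with
      | nil => exact absurd h0 (hmem l0 (by simp))
      | cons p0 ps0 =>
          simp only [List.flatMap_cons, h0, List.map_cons, List.cons_append]
          show (let fin := (ps0.map (pvTri l0) ++ ls.flatMap (fun l => (pvPairs (spans.flatMap (pvClip interval.1 interval.2)) l).map (pvTri l))).foldl pvMergeStepA ([], (l0, p0.1, p0.2));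
                 fin.1 ++ [fin.2]) = _
          rw [scan_groups (pvPairs (spans.flatMap (pvClip interval.1 interval.2))) ls []
            l0 p0.1 p0.2 ps0
            (fun g hg => (List.pairwise_cons.mp hpw).1 g hg)
            (List.pairwise_cons.mp hpw).2
            (fun g hg => hmem g (List.mem_cons_of_mem _ hg))]
          rw [List.foldl_cons, pvBGroup_eq, h0]
          exact hfold ls _
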